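-- pv_equiv track=rewrite | github.com/irisbur/coding-challenges | Advent-of-code/2015/day 6.py | count_lights_on
-- ===== SOURCE A (Python) =====
-- def on(x):
--     return x + 1
--
-- def off(x):
--     return max(x - 1, 0)
--
-- def toggle(x):
--     return x + 2
--
-- def count_lights_on(instructions):
--     map_ = {'on': on, 'off': off, 'toggle': toggle}
--     lights = 0
--     grid = [[0 for _ in range(1000)] for _ in range(1000)]
--     for instruction, rows, cols in instructions:
--         for r in range(rows[0], rows[1] + 1):
--             for c in range(cols[0], cols[1] + 1):
--                 grid[r][c] = map_[instruction](grid[r][c])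
--
--     for i in range(len(grid)):
--         for j in range(len(grid[0])):
--             lights += grid[i][j]
--
--     return lights
-- ===== SOURCE B (Python) =====
-- def strip_region_value(strip, y):
--     v = 0
--     for k, c0, c1 in strip:
--         if c0 <= y < c1:
--             if k == 'on':
--                 v += 1
--             elif k == 'toggle':
--                 v += 2
--             elif k == 'off':
--                 v = max(v - 1, 0)
--     return v
--
-- def count_lights_on(instructions):
--     # coordinate compression: half-open rectangles, distinct boundaries, one
--     # op-sequence evaluation per region, multiplied by the region's area
--     rects = [(k, r0, r1 + 1, c0, c1 + 1)
--              for k, (r0, r1), (c0, c1) in instructions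
--              if r0 <= r1 and c0 <= c1]
--     xs = sorted({v for _, r0, r1, _, _ in rects for v in (r0, r1)})
--     total = 0
--     for i in range(len(xs) - 1):
--         x = xs[i]
--         strip = [(k, c0, c1) for k, r0, r1, c0, c1 in rects if r0 <= x < r1]
--         ys = sorted({v for _, c0, c1 in strip for v in (c0, c1)})
--         w = xs[i + 1] - x
--         for j in range(len(ys) - 1):
--             total += strip_region_value(strip, ys[j]) * w * (ys[j + 1] - ys[j])
--     return total
-- ===== Notes on version B (the rewrite author's own statement) =====
-- stated objective: faster
-- what changed: B replaces A's cell-by-cell updates of a materialized 1000x1000 grid by coordinate compression: rectangles become half-open, the distinct x-boundaries cut the plane into strips, each strip keeps only the rectangles covering it with their own y-boundaries, and the op-sequence is evaluated once per region and multiplied by the region's area.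
-- outside the precondition, e.g. on count_lights_on([('on', (998, 999), (0, 0)), ('off', (-2, -1), (0, 0))]): A returns 0, B returns 2
import Mathlib
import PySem

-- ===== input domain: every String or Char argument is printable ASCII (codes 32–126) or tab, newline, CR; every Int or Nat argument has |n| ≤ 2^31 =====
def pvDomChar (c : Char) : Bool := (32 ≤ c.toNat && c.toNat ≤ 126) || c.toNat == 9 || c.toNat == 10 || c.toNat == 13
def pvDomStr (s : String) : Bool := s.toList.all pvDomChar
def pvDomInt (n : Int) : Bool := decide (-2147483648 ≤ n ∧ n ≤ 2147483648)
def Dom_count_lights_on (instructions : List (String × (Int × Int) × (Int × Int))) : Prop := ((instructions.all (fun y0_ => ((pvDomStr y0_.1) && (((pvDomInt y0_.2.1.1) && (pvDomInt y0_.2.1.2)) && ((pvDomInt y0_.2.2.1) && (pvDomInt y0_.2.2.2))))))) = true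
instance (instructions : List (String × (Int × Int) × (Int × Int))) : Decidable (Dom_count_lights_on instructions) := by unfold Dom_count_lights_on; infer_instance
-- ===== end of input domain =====

-- B replaces A's cell-by-cell updates of a 1000x1000 grid by coordinate compression
-- (one op-sequence evaluation per rectangular region, multiplied by its area).


-- ===== PORT A =====
def pvOn (x : Int) : Int := x + 1
def pvOff (x : Int) : Int := max (x - 1) 0
def pvToggle (x : Int) : Int := x + 2

def pvMap : PySem.Dict String (Int → Int) :=
  PySem.Dict.ofList [("on", pvOn), ("off", pvOff), ("toggle", pvToggle)]

-- map_[instruction](x); a missing key is Python's KeyError, excluded by Pre_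
def pvApply (k : String) (x : Int) : Int :=
  match PySem.Dict.get? pvMap k with
  | some f => f x
  | none => x

-- Python list index: negative wraps once; out of range raises IndexError (excluded
-- by Pre_, where these helpers return a default / leave the grid unchanged).
-- The Python lists-of-lists grid is ported as Array (Array Int) (hand-ported,
-- exact on the indices Pre_ admits; Arrays keep the port evaluable).
def pvIdx? (n : Nat) (i : Int) : Option Nat :=
  if 0 ≤ i ∧ i < (n : Int) then some i.toNat
  else if -(n : Int) ≤ i ∧ i < 0 then some (i + n).toNat
  else none

-- grid[r]
def pvRow (g : Array (Array Int)) (r : Int) : Array Int :=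
  match pvIdx? g.size r with
  | some i => g[i]!
  | none => #[]

-- row[c]
def pvAt (row : Array Int) (c : Int) : Int :=
  match pvIdx? row.size c with
  | some j => row[j]!
  | none => 0

-- grid[r][c]
def pvGridGet (g : Array (Array Int)) (r c : Int) : Int := pvAt (pvRow g r) c

-- grid[r][c] = v
def pvGridSet (g : Array (Array Int)) (r c : Int) (v : Int) : Array (Array Int) :=
  match pvIdx? g.size r with
  | some i =>
    match pvIdx? g[i]!.size c with
    | some j => g.modify i (fun row => row.set! j v)
    | none => g
  | none => g

def count_lights_on (instructions : List (String × (Int × Int) × (Int × Int))) : Int :=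
  let grid0 : Array (Array Int) :=
    ((PySem.List.pyRange 0 1000).map (fun _ =>
      ((PySem.List.pyRange 0 1000).map (fun _ => (0 : Int))).toArray)).toArray
  let grid := instructions.foldl (fun g ins =>
    (PySem.List.pyRange ins.2.1.1 (ins.2.1.2 + 1)).foldl (fun g r =>
      (PySem.List.pyRange ins.2.2.1 (ins.2.2.2 + 1)).foldl (fun g c =>
        pvGridSet g r c (pvApply ins.1 (pvGridGet g r c))) g) g) grid0
  (PySem.List.pyRange 0 (grid.size : Int)).foldl (fun lights i =>
    (PySem.List.pyRange 0 ((pvRow grid 0).size : Int)).foldl (fun lights j =>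
      lights + pvGridGet grid i j) lights) 0

-- ===== PORT B =====
def pvStripRegionValue (strip : List (String × Int × Int)) (y : Int) : Int :=
  strip.foldl (fun v t =>
    if t.2.1 ≤ y ∧ y < t.2.2 then
      if t.1 == "on" then v + 1
      else if t.1 == "toggle" then v + 2
      else if t.1 == "off" then max (v - 1) 0
      else v
    else v) 0

def pvRects (instructions : List (String × (Int × Int) × (Int × Int))) :
    List (String × Int × Int × Int × Int) :=
  (instructions.filter (fun ins => decide (ins.2.1.1 ≤ ins.2.1.2 ∧ ins.2.2.1 ≤ ins.2.2.2))).map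
    (fun ins => (ins.1, ins.2.1.1, ins.2.1.2 + 1, ins.2.2.1, ins.2.2.2 + 1))

def pvXs (rects : List (String × Int × Int × Int × Int)) : List Int :=
  PySem.List.sorted (PySem.Set.ofList (rects.flatMap (fun t => [t.2.1, t.2.2.1]))) id

def pvStrip (rects : List (String × Int × Int × Int × Int)) (x : Int) :
    List (String × Int × Int) :=
  (rects.filter (fun t => decide (t.2.1 ≤ x ∧ x < t.2.2.1))).map
    (fun t => (t.1, t.2.2.2.1, t.2.2.2.2))

def pvYs (strip : List (String × Int × Int)) : List Int :=
  PySem.List.sorted (PySem.Set.ofList (strip.flatMap (fun t => [t.2.1, t.2.2]))) id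

def count_lights_on_alt (instructions : List (String × (Int × Int) × (Int × Int))) : Int :=
  let rects := pvRects instructions
  let xs := pvXs rects
  (PySem.List.pyRange 0 (PySem.List.len xs - 1)).foldl (fun total i =>
    let x := PySem.List.pyGetD xs i 0
    let strip := pvStrip rects x
    let ys := pvYs strip
    let w := PySem.List.pyGetD xs (i + 1) 0 - x
    (PySem.List.pyRange 0 (PySem.List.len ys - 1)).foldl (fun total j =>
      total + pvStripRegionValue strip (PySem.List.pyGetD ys j 0) * w *
        (PySem.List.pyGetD ys (j + 1) 0 - PySem.List.pyGetD ys j 0)) total) 0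

-- ===== PRECONDITION & SPEC =====
-- Pre_ keeps A's natural domain: every instruction whose rectangle is nonempty (the only
-- ones A's loops evaluate) must have a known kind and coordinates inside the 1000×1000
-- grid.  This excludes the inputs where A raises KeyError/IndexError, and also inputs
-- with coordinates in [-1000,-1], outside the puzzle's domain, where A still returns a
-- value only through Python's negative-index wraparound onto the opposite grid edge.
def Pre_count_lights_on (instructions : List (String × (Int × Int) × (Int × Int))) : Prop :=
  ∀ ins ∈ instructions, ins.2.1.1 ≤ ins.2.1.2 → ins.2.2.1 ≤ ins.2.2.2 →
    (ins.1 = "on" ∨ ins.1 = "off" ∨ ins.1 = "toggle") ∧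
    0 ≤ ins.2.1.1 ∧ ins.2.1.2 ≤ 999 ∧ 0 ≤ ins.2.2.1 ∧ ins.2.2.2 ≤ 999
instance (instructions : List (String × (Int × Int) × (Int × Int))) : Decidable (Pre_count_lights_on instructions) := by unfold Pre_count_lights_on; infer_instance

def pvWitness_count_lights_on : (List (String × (Int × Int) × (Int × Int))) :=
  [("on", (0, 2), (0, 4)), ("toggle", (1, 1), (3, 9)), ("off", (0, 999), (5, 5)), ("on", (7, 3), (0, 0))]

def Spec_count_lights_on (instructions : List (String × (Int × Int) × (Int × Int))) (out : Int) : Prop := out = count_lights_on_alt instructions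
instance (instructions : List (String × (Int × Int) × (Int × Int))) (out : Int) : Decidable (Spec_count_lights_on instructions out) := by unfold Spec_count_lights_on; infer_instance

-- ===== CLAIM (what is proved, stated in full; the proofs are below) =====
def Claim_equal_count_lights_on : Prop := ∀ (instructions : List (String × (Int × Int) × (Int × Int))), Dom_count_lights_on instructions → Pre_count_lights_on instructions → Spec_count_lights_on instructions (count_lights_on instructions)

-- ===== LEMMAS AND PROOFS =====

-- B's operation chain, as a named function (used to state per-cell values)
def pvOp (k : String) (v : Int) : Int :=
  if k == "on" then v + 1
  else if k == "toggle" then v + 2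
  else if k == "off" then max (v - 1) 0
  else v

-- the value of cell (x, y) after running the half-open rectangle list
def pvRectCell (rects : List (String × Int × Int × Int × Int)) (x y : Int) : Int :=
  rects.foldl (fun v t =>
    if t.2.1 ≤ x ∧ x < t.2.2.1 ∧ t.2.2.2.1 ≤ y ∧ y < t.2.2.2.2 then pvOp t.1 v else v) 0

-- a well-formed 1000×1000 grid
def pvOK (g : Array (Array Int)) : Prop :=
  g.size = 1000 ∧ ∀ (i : Nat), i < g.size → g[i]!.size = 1000

-- consecutive pairs of a list
def pvPairs : List Int → List (Int × Int)
  | a :: b :: t => (a, b) :: pvPairs (b :: t)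
  | _ => []

theorem pvApply_eq_pvOp (k : String) (v : Int) : pvApply k v = pvOp k v := by
  have hm : pvMap = PySem.Dict.mk [("on", pvOn), ("off", pvOff), ("toggle", pvToggle)] := rfl
  by_cases h1 : k = "on"
  · subst h1; rfl
  by_cases h2 : k = "off"
  · subst h2; rfl
  by_cases h3 : k = "toggle"
  · subst h3; rfl
  simp only [pvApply, pvOp, hm, PySem.Dict.get?_mk_cons]
  have e1 : (("on" : String) == k) = false := by simpa using Ne.symm h1
  have e2 : (("off" : String) == k) = false := by simpa using Ne.symm h2
  have e3 : (("toggle" : String) == k) = false := by simpa using Ne.symm h3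
  have f1 : (k == ("on" : String)) = false := by simpa using h1
  have f2 : (k == ("off" : String)) = false := by simpa using h2
  have f3 : (k == ("toggle" : String)) = false := by simpa using h3
  simp [e1, e2, e3, f1, f2, f3, PySem.Dict.get?]

theorem pvGetBang_eq {α : Type} [Inhabited α] (a : Array α) (i : Nat) (h : i < a.size) :
    a[i]! = a[i] := by
  rw [Array.getElem!_eq_getD, Array.getD_eq_getD_getElem?, Array.getElem?_eq_getElem h]
  rfl

theorem pvIdx?_inb (n : Nat) (i : Int) (h0 : 0 ≤ i) (h1 : i < (n : Int)) :
    pvIdx? n i = some i.toNat := by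
  unfold pvIdx?
  rw [if_pos ⟨h0, h1⟩]

theorem pvOK_set (g : Array (Array Int)) (r c v : Int) (hOK : pvOK g)
    (hr0 : 0 ≤ r) (hr1 : r < 1000) : pvOK (pvGridSet g r c v) := by
  obtain ⟨hlen, hrows⟩ := hOK
  unfold pvGridSet
  rw [pvIdx?_inb g.size r hr0 (by rw [hlen]; exact_mod_cast hr1)]
  dsimp only
  cases hj : pvIdx? (g[r.toNat]!).size c with
  | none => exact ⟨hlen, hrows⟩
  | some j =>
    simp only [Array.set!]
    constructor
    · rw [Array.size_modify]; exact hlen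
    · intro i hi
      rw [Array.size_modify] at hi
      rw [pvGetBang_eq _ i (by rw [Array.size_modify]; exact hi)]
      rw [Array.getElem_modify (by rw [Array.size_modify]; exact hi)]
      by_cases he : r.toNat = i
      · rw [if_pos he, Array.size_setIfInBounds, ← pvGetBang_eq _ i hi]
        exact hrows i hi
      · rw [if_neg he, ← pvGetBang_eq _ i hi]
        exact hrows i hi

theorem pvGridSet_get (g : Array (Array Int)) (r c r' c' v : Int) (hOK : pvOK g)
    (hr0 : 0 ≤ r) (hr1 : r < 1000) (hc0 : 0 ≤ c) (hc1 : c < 1000)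
    (hr0' : 0 ≤ r') (hr1' : r' < 1000) (hc0' : 0 ≤ c') (hc1' : c' < 1000) :
    pvGridGet (pvGridSet g r c v) r' c' =
      if r' = r ∧ c' = c then v else pvGridGet g r' c' := by
  obtain ⟨hlen, hrows⟩ := hOK
  have hrn : r.toNat < g.size := by omega
  have hrowlen : (g[r.toNat]!).size = 1000 := hrows r.toNat hrn
  have hbr : g[r'.toNat]! = g[r'.toNat] := pvGetBang_eq g r'.toNat (by omega)
  have hszb : (g[r'.toNat]!).size = 1000 := hrows r'.toNat (by omega)
  have hsz' : (g[r'.toNat]).size = 1000 := by rw [← hbr]; exact hszb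
  unfold pvGridGet pvGridSet pvRow pvAt
  rw [pvIdx?_inb g.size r hr0 (by rw [hlen]; exact_mod_cast hr1)]
  dsimp only
  rw [pvIdx?_inb (g[r.toNat]!).size c hc0 (by rw [hrowlen]; exact_mod_cast hc1)]
  dsimp only
  simp only [Array.set!]
  have hsz : (g.modify r.toNat (fun row => row.setIfInBounds c.toNat v)).size = 1000 := by
    rw [Array.size_modify]; exact hlen
  rw [pvIdx?_inb _ r' hr0' (by rw [hsz]; exact_mod_cast hr1')]
  dsimp only
  rw [pvGetBang_eq _ r'.toNat (by omega)]
  rw [Array.getElem_modify (by omega)]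
  by_cases hrr : r.toNat = r'.toNat
  · rw [if_pos hrr]
    have hre : r' = r := by omega
    have hrowlen2 : ((g[r'.toNat]).setIfInBounds c.toNat v).size = 1000 := by
      rw [Array.size_setIfInBounds]; exact hsz'
    rw [pvIdx?_inb ((g[r'.toNat]).setIfInBounds c.toNat v).size c' hc0' (by omega)]
    dsimp only
    rw [pvGetBang_eq _ c'.toNat (by omega)]
    rw [Array.getElem_setIfInBounds (by omega)]
    by_cases hcc : c.toNat = c'.toNat
    · rw [if_pos hcc, if_pos ⟨hre, by omega⟩]
    · rw [if_neg hcc, if_neg (by intro hand; exact hcc (by omega))]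
      rw [pvIdx?_inb g.size r' hr0' (by rw [hlen]; exact_mod_cast hr1')]
      dsimp only
      rw [pvIdx?_inb (g[r'.toNat]!).size c' hc0' (by omega)]
      dsimp only
      rw [hbr, pvGetBang_eq (g[r'.toNat]) c'.toNat (by omega)]
  · rw [if_neg hrr, if_neg (by intro hand; exact hrr (by omega))]
    rw [pvIdx?_inb g.size r' hr0' (by rw [hlen]; exact_mod_cast hr1')]
    dsimp only
    rw [pvIdx?_inb (g[r'.toNat]).size c' hc0' (by omega)]
    rw [pvIdx?_inb (g[r'.toNat]!).size c' hc0' (by omega)]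
    dsimp only
    rw [hbr]

theorem pvColFold (k : String) (r : Int) (n : Nat) :
    ∀ (c0 : Int) (g : Array (Array Int)), pvOK g → 0 ≤ r → r < 1000 →
    0 ≤ c0 → c0 + n ≤ 1000 →
    pvOK ((PySem.List.pyRange c0 (c0 + n)).foldl
        (fun g c => pvGridSet g r c (pvApply k (pvGridGet g r c))) g) ∧
    ∀ r' c', 0 ≤ r' → r' < 1000 → 0 ≤ c' → c' < 1000 →
      pvGridGet ((PySem.List.pyRange c0 (c0 + n)).foldl
          (fun g c => pvGridSet g r c (pvApply k (pvGridGet g r c))) g) r' c' =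
        if r' = r ∧ c0 ≤ c' ∧ c' < c0 + n then pvApply k (pvGridGet g r' c')
        else pvGridGet g r' c' := by
  induction n with
  | zero =>
    intro c0 g hOK hr0 hr1 hc0 hcn
    rw [show ((0 : Nat) : Int) = 0 from rfl, add_zero,
      PySem.List.pyRange_one_eq_nil (le_refl c0)]
    refine ⟨hOK, ?_⟩
    intro r' c' _ _ _ _
    rw [if_neg (by omega)]
    rfl
  | succ n ih =>
    intro c0 g hOK hr0 hr1 hc0 hcn
    have hsplit : c0 + ((n + 1 : Nat) : Int) = (c0 + n) + 1 := by push_cast; ring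
    rw [hsplit, PySem.List.pyRange_one_succ_right (by omega : c0 ≤ c0 + (n : Int)), List.foldl_append]
    obtain ⟨ihOK, ihget⟩ := ih c0 g hOK hr0 hr1 hc0 (by omega)
    set gmid := (PySem.List.pyRange c0 (c0 + n)).foldl
      (fun g c => pvGridSet g r c (pvApply k (pvGridGet g r c))) g with hgmid
    simp only [List.foldl_cons, List.foldl_nil]
    refine ⟨pvOK_set gmid r (c0 + n) _ ihOK hr0 hr1, ?_⟩
    intro r' c' hr0' hr1' hc0' hc1'
    rw [pvGridSet_get gmid r (c0 + n) r' c' _ ihOK hr0 hr1 (by omega) (by omega)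
      hr0' hr1' hc0' hc1']
    by_cases hlast : r' = r ∧ c' = c0 + n
    · rw [if_pos hlast]
      rw [ihget r (c0 + n) hr0 hr1 (by omega) (by omega)]
      rw [if_neg (by omega), if_pos (by omega), hlast.1, hlast.2]
    · rw [if_neg hlast]
      rw [ihget r' c' hr0' hr1' hc0' hc1']
      by_cases hmid : r' = r ∧ c0 ≤ c' ∧ c' < c0 + n
      · rw [if_pos hmid, if_pos (by omega)]
      · rw [if_neg hmid, if_neg (by omega)]

theorem pvColWrap (k : String) (r cs ce : Int) (g : Array (Array Int)) (hOK : pvOK g)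
    (hr0 : 0 ≤ r) (hr1 : r < 1000) (hcb : cs ≤ ce → 0 ≤ cs ∧ ce + 1 ≤ 1000) :
    pvOK ((PySem.List.pyRange cs (ce + 1)).foldl
        (fun g c => pvGridSet g r c (pvApply k (pvGridGet g r c))) g) ∧
    ∀ r' c', 0 ≤ r' → r' < 1000 → 0 ≤ c' → c' < 1000 →
      pvGridGet ((PySem.List.pyRange cs (ce + 1)).foldl
          (fun g c => pvGridSet g r c (pvApply k (pvGridGet g r c))) g) r' c' =
        if r' = r ∧ cs ≤ c' ∧ c' ≤ ce then pvApply k (pvGridGet g r' c')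
        else pvGridGet g r' c' := by
  by_cases hne : cs ≤ ce
  · obtain ⟨hcs, hce⟩ := hcb hne
    have hm : ce + 1 = cs + ((ce + 1 - cs).toNat : Int) := by omega
    rw [hm]
    obtain ⟨h1, h2⟩ := pvColFold k r (ce + 1 - cs).toNat cs g hOK hr0 hr1 hcs (by omega)
    refine ⟨h1, ?_⟩
    intro r' c' a b c d
    rw [h2 r' c' a b c d]
    by_cases hcond : r' = r ∧ cs ≤ c' ∧ c' ≤ ce
    · rw [if_pos (by constructor; exact hcond.1; omega), if_pos hcond]
    · rw [if_neg (by omega), if_neg hcond]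
  · rw [PySem.List.pyRange_one_eq_nil (by omega)]
    refine ⟨hOK, ?_⟩
    intro r' c' _ _ _ _
    rw [if_neg (by omega)]
    rfl

theorem pvRowFold (k : String) (cs ce : Int) (n : Nat) :
    ∀ (r0 : Int) (g : Array (Array Int)), pvOK g → 0 ≤ r0 → r0 + n ≤ 1000 →
    (cs ≤ ce → 0 ≤ cs ∧ ce + 1 ≤ 1000) →
    pvOK ((PySem.List.pyRange r0 (r0 + n)).foldl
        (fun g r => (PySem.List.pyRange cs (ce + 1)).foldl
          (fun g c => pvGridSet g r c (pvApply k (pvGridGet g r c))) g) g) ∧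
    ∀ r' c', 0 ≤ r' → r' < 1000 → 0 ≤ c' → c' < 1000 →
      pvGridGet ((PySem.List.pyRange r0 (r0 + n)).foldl
          (fun g r => (PySem.List.pyRange cs (ce + 1)).foldl
            (fun g c => pvGridSet g r c (pvApply k (pvGridGet g r c))) g) g) r' c' =
        if r0 ≤ r' ∧ r' < r0 + n ∧ cs ≤ c' ∧ c' ≤ ce then pvApply k (pvGridGet g r' c')
        else pvGridGet g r' c' := by
  induction n with
  | zero =>
    intro r0 g hOK hr0 hrn hcb
    rw [show ((0 : Nat) : Int) = 0 from rfl, add_zero,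
      PySem.List.pyRange_one_eq_nil (le_refl r0)]
    refine ⟨hOK, ?_⟩
    intro r' c' _ _ _ _
    rw [if_neg (by omega)]
    rfl
  | succ n ih =>
    intro r0 g hOK hr0 hrn hcb
    have hsplit : r0 + ((n + 1 : Nat) : Int) = (r0 + n) + 1 := by push_cast; ring
    rw [hsplit, PySem.List.pyRange_one_succ_right (by omega : r0 ≤ r0 + (n : Int)),
      List.foldl_append]
    obtain ⟨ihOK, ihget⟩ := ih r0 g hOK hr0 (by omega) hcb
    set gmid := (PySem.List.pyRange r0 (r0 + n)).foldl
      (fun g r => (PySem.List.pyRange cs (ce + 1)).foldl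
        (fun g c => pvGridSet g r c (pvApply k (pvGridGet g r c))) g) g with hgmid
    simp only [List.foldl_cons, List.foldl_nil]
    obtain ⟨wOK, wget⟩ := pvColWrap k (r0 + n) cs ce gmid ihOK (by omega) (by omega) hcb
    refine ⟨wOK, ?_⟩
    intro r' c' a b c d
    rw [wget r' c' a b c d]
    by_cases hlast : r' = r0 + n ∧ cs ≤ c' ∧ c' ≤ ce
    · rw [if_pos hlast]
      rw [ihget r' c' a b c d, if_neg (by omega), if_pos (by omega)]
    · rw [if_neg hlast]
      rw [ihget r' c' a b c d]
      by_cases hmid : r0 ≤ r' ∧ r' < r0 + n ∧ cs ≤ c' ∧ c' ≤ ce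
      · rw [if_pos hmid, if_pos (by omega)]
      · rw [if_neg hmid, if_neg (by omega)]

theorem pvInstrWrap (ins : String × (Int × Int) × (Int × Int)) (g : Array (Array Int))
    (hOK : pvOK g)
    (hb : ins.2.1.1 ≤ ins.2.1.2 → ins.2.2.1 ≤ ins.2.2.2 →
      0 ≤ ins.2.1.1 ∧ ins.2.1.2 ≤ 999 ∧ 0 ≤ ins.2.2.1 ∧ ins.2.2.2 ≤ 999) :
    pvOK ((PySem.List.pyRange ins.2.1.1 (ins.2.1.2 + 1)).foldl (fun g r =>
      (PySem.List.pyRange ins.2.2.1 (ins.2.2.2 + 1)).foldl (fun g c =>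
        pvGridSet g r c (pvApply ins.1 (pvGridGet g r c))) g) g) ∧
    ∀ r' c', 0 ≤ r' → r' < 1000 → 0 ≤ c' → c' < 1000 →
      pvGridGet ((PySem.List.pyRange ins.2.1.1 (ins.2.1.2 + 1)).foldl (fun g r =>
        (PySem.List.pyRange ins.2.2.1 (ins.2.2.2 + 1)).foldl (fun g c =>
          pvGridSet g r c (pvApply ins.1 (pvGridGet g r c))) g) g) r' c' =
        if ins.2.1.1 ≤ r' ∧ r' ≤ ins.2.1.2 ∧ ins.2.2.1 ≤ c' ∧ c' ≤ ins.2.2.2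
        then pvApply ins.1 (pvGridGet g r' c') else pvGridGet g r' c' := by
  obtain ⟨k, ⟨r0, r1⟩, ⟨cs, ce⟩⟩ := ins
  simp only at hb ⊢
  by_cases hcne : cs ≤ ce
  · by_cases hrne : r0 ≤ r1
    · obtain ⟨h1, h2, h3, h4⟩ := hb hrne hcne
      have hm : r1 + 1 = r0 + ((r1 + 1 - r0).toNat : Int) := by omega
      rw [hm]
      obtain ⟨hOK', hget⟩ := pvRowFold k cs ce (r1 + 1 - r0).toNat r0 g hOK (by omega)
        (by omega) (fun _ => ⟨by omega, by omega⟩)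
      refine ⟨hOK', ?_⟩
      intro r' c' a b c d
      rw [hget r' c' a b c d]
      by_cases hcond : r0 ≤ r' ∧ r' ≤ r1 ∧ cs ≤ c' ∧ c' ≤ ce
      · rw [if_pos (by omega), if_pos hcond]
      · rw [if_neg (by omega), if_neg hcond]
    · rw [PySem.List.pyRange_one_eq_nil (by omega : r1 + 1 ≤ r0)]
      refine ⟨hOK, ?_⟩
      intro r' c' _ _ _ _
      rw [if_neg (by omega)]
      rfl
  · have hnil : PySem.List.pyRange cs (ce + 1) = [] :=
      PySem.List.pyRange_one_eq_nil (by omega)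
    rw [hnil]
    simp only [List.foldl_nil]
    rw [PySem.List.foldl_ignore]
    refine ⟨hOK, ?_⟩
    intro r' c' _ _ _ _
    rw [if_neg (by omega)]

theorem pvInstrFold (l : List (String × (Int × Int) × (Int × Int))) :
    ∀ (g : Array (Array Int)), pvOK g → Pre_count_lights_on l →
    pvOK (l.foldl (fun g ins =>
      (PySem.List.pyRange ins.2.1.1 (ins.2.1.2 + 1)).foldl (fun g r =>
        (PySem.List.pyRange ins.2.2.1 (ins.2.2.2 + 1)).foldl (fun g c =>
          pvGridSet g r c (pvApply ins.1 (pvGridGet g r c))) g) g) g) ∧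
    ∀ r c, 0 ≤ r → r < 1000 → 0 ≤ c → c < 1000 →
      pvGridGet (l.foldl (fun g ins =>
        (PySem.List.pyRange ins.2.1.1 (ins.2.1.2 + 1)).foldl (fun g r =>
          (PySem.List.pyRange ins.2.2.1 (ins.2.2.2 + 1)).foldl (fun g c =>
            pvGridSet g r c (pvApply ins.1 (pvGridGet g r c))) g) g) g) r c =
        l.foldl (fun v ins =>
          if ins.2.1.1 ≤ r ∧ r ≤ ins.2.1.2 ∧ ins.2.2.1 ≤ c ∧ c ≤ ins.2.2.2
          then pvApply ins.1 v else v) (pvGridGet g r c) := by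
  induction l with
  | nil => intro g hOK _; exact ⟨hOK, fun _ _ _ _ _ _ => rfl⟩
  | cons ins tl ih =>
    intro g hOK hpre
    simp only [List.foldl_cons]
    obtain ⟨wOK, wget⟩ := pvInstrWrap ins g hOK
      (fun h1 h2 => ((hpre ins (by simp)) h1 h2).2)
    obtain ⟨fOK, fget⟩ := ih _ wOK (fun i hi => hpre i (by simp [hi]))
    refine ⟨fOK, ?_⟩
    intro r c a b cc d
    rw [fget r c a b cc d, wget r c a b cc d]

theorem pvCell_eq_rects (l : List (String × (Int × Int) × (Int × Int))) (x y : Int) :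
    l.foldl (fun v ins =>
      if ins.2.1.1 ≤ x ∧ x ≤ ins.2.1.2 ∧ ins.2.2.1 ≤ y ∧ y ≤ ins.2.2.2
      then pvOp ins.1 v else v) 0 = pvRectCell (pvRects l) x y := by
  unfold pvRectCell pvRects
  rw [List.foldl_map]
  dsimp only
  refine Eq.trans ?_ (PySem.List.foldl_if_eq_foldl_filter
    (p := fun ins => decide (ins.2.1.1 ≤ ins.2.1.2 ∧ ins.2.2.1 ≤ ins.2.2.2))
    (f := fun (v : Int) (ins : String × (Int × Int) × (Int × Int)) =>
      if ins.2.1.1 ≤ x ∧ x < ins.2.1.2 + 1 ∧ ins.2.2.1 ≤ y ∧ y < ins.2.2.2 + 1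
      then pvOp ins.1 v else v) (l := l) (init := 0))
  apply PySem.List.foldl_congr_mem
  intro acc ins _
  simp only [decide_eq_true_eq]
  split_ifs <;> first | rfl | omega

theorem pvStrip_cell (rects : List (String × Int × Int × Int × Int)) (x y : Int) :
    pvStripRegionValue (pvStrip rects x) y = pvRectCell rects x y := by
  unfold pvStripRegionValue pvStrip pvRectCell
  rw [List.foldl_map]
  dsimp only
  refine Eq.trans (PySem.List.foldl_if_eq_foldl_filter
    (p := fun (t : String × Int × Int × Int × Int) => decide (t.2.1 ≤ x ∧ x < t.2.2.1))
    (f := fun (v : Int) (t : String × Int × Int × Int × Int) =>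
      if t.2.2.2.1 ≤ y ∧ y < t.2.2.2.2 then
        if t.1 == "on" then v + 1
        else if t.1 == "toggle" then v + 2
        else if t.1 == "off" then max (v - 1) 0
        else v
      else v) (l := rects) (init := 0)).symm ?_
  apply PySem.List.foldl_congr_mem
  intro acc t _
  simp only [decide_eq_true_eq, pvOp]
  split_ifs <;> first | rfl | omega

theorem pvPairs_facts (bs : List Int) (h : bs.Pairwise (· < ·)) :
    ∀ p ∈ pvPairs bs, p.1 ∈ bs ∧ p.2 ∈ bs ∧ p.1 < p.2 ∧
      ∀ q ∈ bs, q ≤ p.1 ∨ p.2 ≤ q := by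
  induction bs with
  | nil => intro p hp; simp [pvPairs] at hp
  | cons a rest ih =>
    cases rest with
    | nil => intro p hp; simp [pvPairs] at hp
    | cons b t =>
      intro p hp
      rw [show pvPairs (a :: b :: t) = (a, b) :: pvPairs (b :: t) from rfl] at hp
      rcases List.mem_cons.mp hp with hp | hp
      · subst hp
        have hab : a < b := (List.pairwise_cons.mp h).1 b (by simp)
        refine ⟨by simp, by simp, hab, ?_⟩
        intro q hq
        rcases List.mem_cons.mp hq with rfl | hq
        · exact Or.inl le_rfl
        rcases List.mem_cons.mp hq with rfl | hq
        · exact Or.inr le_rfl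
        · exact Or.inr (le_of_lt ((List.pairwise_cons.mp (List.pairwise_cons.mp h).2).1 q hq))
      · obtain ⟨h1, h2, h3, h4⟩ := ih (List.pairwise_cons.mp h).2 p hp
        refine ⟨List.mem_cons_of_mem _ h1, List.mem_cons_of_mem _ h2, h3, ?_⟩
        intro q hq
        rcases List.mem_cons.mp hq with rfl | hq
        · exact Or.inl (le_of_lt ((List.pairwise_cons.mp h).1 p.1 h1))
        · exact h4 q hq

theorem pvPairs_map_aux (g : Int → Int → Int) :
    ∀ (xs : List Int), (List.range (xs.length - 1)).map
        (fun k => g (xs.getD k 0) (xs.getD (k + 1) 0)) =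
      (pvPairs xs).map (fun p => g p.1 p.2) := by
  intro xs
  induction xs with
  | nil => simp [pvPairs]
  | cons a rest ih =>
    cases rest with
    | nil => simp [pvPairs]
    | cons b t =>
      show (List.range (t.length + 1)).map _ = _
      rw [List.range_succ_eq_map, List.map_cons, List.map_map]
      rw [show pvPairs (a :: b :: t) = (a, b) :: pvPairs (b :: t) from rfl, List.map_cons]
      congr 1

theorem pvFoldPairs (xs : List Int) (g : Int → Int → Int) (init : Int) :
    (PySem.List.pyRange 0 (PySem.List.len xs - 1)).foldl
      (fun t i => t + g (PySem.List.pyGetD xs i 0) (PySem.List.pyGetD xs (i + 1) 0)) init =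
    init + ((pvPairs xs).map (fun p => g p.1 p.2)).sum := by
  rw [PySem.List.foldl_add]
  congr 1
  have hlen : ((PySem.List.len xs - 1) - 0).toNat = xs.length - 1 := by
    simp [PySem.List.len_eq]
  rw [PySem.List.pyRange_one, List.map_map, hlen]
  have hfun : ((fun i => g (PySem.List.pyGetD xs i 0) (PySem.List.pyGetD xs (i + 1) 0)) ∘
      (fun k : Nat => (0 : Int) + ↑k)) = fun k : Nat => g (xs.getD k 0) (xs.getD (k + 1) 0) := by
    funext k
    show g (PySem.List.pyGetD xs ((0 : Int) + k) 0) (PySem.List.pyGetD xs ((0 : Int) + k + 1) 0) = _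
    rw [show ((0 : Int) + k) = (k : Int) by omega,
      show ((k : Int) + 1) = ((k + 1 : Nat) : Int) by push_cast; ring,
      PySem.List.pyGetD_natCast, PySem.List.pyGetD_natCast]
  rw [hfun]
  rw [pvPairs_map_aux g xs]

theorem pvTile (bs : List Int) : ∀ (lo hi : Int) (f : Int → Int),
    bs.Pairwise (· < ·) →
    (∀ x ∈ bs, lo ≤ x ∧ x ≤ hi) →
    (∀ x, lo ≤ x → x < hi →
      ((∀ q ∈ bs, ¬ q ≤ x) ∨ (∀ q ∈ bs, ¬ x < q)) → f x = 0) →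
    (∀ p ∈ pvPairs bs, ∀ x, p.1 ≤ x → x < p.2 → f x = f p.1) →
    lo ≤ hi →
    ((PySem.List.pyRange lo hi).map f).sum =
      ((pvPairs bs).map (fun p => (p.2 - p.1) * f p.1)).sum := by
  induction bs with
  | nil =>
    intro lo hi f _ _ hz _ _
    simp only [pvPairs, List.map_nil, List.sum_nil]
    apply List.sum_eq_zero
    intro v hv
    obtain ⟨x, hx, rfl⟩ := List.mem_map.mp hv
    obtain ⟨hx1, hx2⟩ := PySem.List.mem_pyRange_one.mp hx
    exact hz x hx1 hx2 (Or.inl (by simp))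
  | cons a rest ih =>
    cases rest with
    | nil =>
      intro lo hi f _ _ hz _ _
      simp only [pvPairs, List.map_nil, List.sum_nil]
      apply List.sum_eq_zero
      intro v hv
      obtain ⟨x, hx, rfl⟩ := List.mem_map.mp hv
      obtain ⟨hx1, hx2⟩ := PySem.List.mem_pyRange_one.mp hx
      by_cases hxa : x < a
      · exact hz x hx1 hx2 (Or.inl (by intro q hq; simp at hq; omega))
      · exact hz x hx1 hx2 (Or.inr (by intro q hq; simp at hq; omega))
    | cons b t =>
      intro lo hi f hs hb hz hc hlohi
      have hab : a < b := (List.pairwise_cons.mp hs).1 b (by simp)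
      have hloa : lo ≤ a := (hb a (by simp)).1
      have hbhi : b ≤ hi := (hb b (by simp)).2
      -- split the range at a and at b
      rw [PySem.List.pyRange_one_append lo a hi hloa (by omega),
        PySem.List.pyRange_one_append a b hi (by omega) hbhi,
        List.map_append, List.map_append, List.sum_append, List.sum_append]
      have s1 : ((PySem.List.pyRange lo a).map f).sum = 0 := by
        apply List.sum_eq_zero
        intro v hv
        obtain ⟨x, hx, rfl⟩ := List.mem_map.mp hv
        obtain ⟨hx1, hx2⟩ := PySem.List.mem_pyRange_one.mp hx
        refine hz x hx1 (by omega) (Or.inl ?_)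
        intro q hq
        rcases List.mem_cons.mp hq with rfl | hq
        · omega
        · have := List.rel_of_pairwise_cons hs hq
          omega
      have s2 : ((PySem.List.pyRange a b).map f).sum = (b - a) * f a := by
        have hconst : ∀ x ∈ PySem.List.pyRange a b, f x = f a := by
          intro x hx
          obtain ⟨hx1, hx2⟩ := PySem.List.mem_pyRange_one.mp hx
          exact hc (a, b) (by rw [show pvPairs (a :: b :: t) = (a, b) :: pvPairs (b :: t) from rfl]; simp) x hx1 hx2
        rw [List.map_congr_left hconst, PySem.List.sum_map_const_int,
          PySem.List.length_pyRange_one]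
        rw [Int.toNat_of_nonneg (by omega)]
      have s3 : ((PySem.List.pyRange b hi).map f).sum =
          ((pvPairs (b :: t)).map (fun p => (p.2 - p.1) * f p.1)).sum := by
        apply ih b hi f (List.pairwise_cons.mp hs).2
        · intro x hx
          rcases List.mem_cons.mp hx with rfl | hx
          · exact ⟨le_refl _, hbhi⟩
          · have h1 := List.rel_of_pairwise_cons (List.pairwise_cons.mp hs).2 hx
            exact ⟨by omega, (hb x (by simp [hx])).2⟩
        · intro x hx1 hx2 hd
          rcases hd with hd | hd
          · exact absurd hx1 (by simpa using hd b (by simp))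
          · refine hz x (by omega) hx2 (Or.inr ?_)
            intro q hq
            rcases List.mem_cons.mp hq with rfl | hq
            · omega
            · exact hd q hq
        · intro p hp
          exact hc p (by rw [show pvPairs (a :: b :: t) = (a, b) :: pvPairs (b :: t) from rfl]; simp [hp])
        · omega
      rw [s1, s2, s3, show pvPairs (a :: b :: t) = (a, b) :: pvPairs (b :: t) from rfl,
        List.map_cons, List.sum_cons]
      ring

theorem pvXs_sorted (rects : List (String × Int × Int × Int × Int)) :
    (pvXs rects).Pairwise (· < ·) := by
  have hle := PySem.List.sorted_pairwise (PySem.Set.ofList (rects.flatMap (fun t => [t.2.1, t.2.2.1]))) (id : Int → Int)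
  have hperm := PySem.List.sorted_perm (PySem.Set.ofList (rects.flatMap (fun t => [t.2.1, t.2.2.1]))) (id : Int → Int) false
  have hnd : (pvXs rects).Nodup := hperm.nodup_iff.mpr (PySem.Set.nodup_ofList _)
  show (pvXs rects).Pairwise (· < ·)
  unfold pvXs
  have hle' : (pvXs rects).Pairwise (· ≤ ·) := by simpa [pvXs] using hle
  have : (pvXs rects).Pairwise (fun a b => a ≤ b ∧ a ≠ b) := hle'.and hnd
  exact (by simpa [pvXs] using this.imp (fun h => lt_of_le_of_ne h.1 h.2))

theorem pvXs_mem (rects : List (String × Int × Int × Int × Int)) (q : Int) :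
    q ∈ pvXs rects ↔ ∃ t ∈ rects, q = t.2.1 ∨ q = t.2.2.1 := by
  unfold pvXs
  rw [(PySem.List.sorted_perm _ _ _).mem_iff, PySem.Set.mem_ofList, List.mem_flatMap]
  constructor
  · rintro ⟨t, ht, hq⟩
    exact ⟨t, ht, by simpa using hq⟩
  · rintro ⟨t, ht, hq⟩
    exact ⟨t, ht, by simpa using hq⟩


theorem pvYs_sorted (strip : List (String × Int × Int)) :
    (pvYs strip).Pairwise (· < ·) := by
  have hle := PySem.List.sorted_pairwise (PySem.Set.ofList (strip.flatMap (fun t => [t.2.1, t.2.2]))) (id : Int → Int)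
  have hperm := PySem.List.sorted_perm (PySem.Set.ofList (strip.flatMap (fun t => [t.2.1, t.2.2]))) (id : Int → Int) false
  have hnd : (pvYs strip).Nodup := hperm.nodup_iff.mpr (PySem.Set.nodup_ofList _)
  have hle' : (pvYs strip).Pairwise (· ≤ ·) := by simpa [pvYs] using hle
  have : (pvYs strip).Pairwise (fun a b => a ≤ b ∧ a ≠ b) := hle'.and hnd
  exact this.imp (fun h => lt_of_le_of_ne h.1 h.2)

theorem pvYs_mem (strip : List (String × Int × Int)) (q : Int) :
    q ∈ pvYs strip ↔ ∃ t ∈ strip, q = t.2.1 ∨ q = t.2.2 := by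
  unfold pvYs
  rw [(PySem.List.sorted_perm _ _ _).mem_iff, PySem.Set.mem_ofList, List.mem_flatMap]
  constructor
  · rintro ⟨t, ht, hq⟩
    exact ⟨t, ht, by simpa using hq⟩
  · rintro ⟨t, ht, hq⟩
    exact ⟨t, ht, by simpa using hq⟩


-- bounds of the compressed rectangles under Pre_
theorem pvRectsOK (l : List (String × (Int × Int) × (Int × Int)))
    (h : Pre_count_lights_on l) : ∀ t ∈ pvRects l,
    0 ≤ t.2.1 ∧ t.2.1 < t.2.2.1 ∧ t.2.2.1 ≤ 1000 ∧
    0 ≤ t.2.2.2.1 ∧ t.2.2.2.1 < t.2.2.2.2 ∧ t.2.2.2.2 ≤ 1000 := by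
  intro t ht
  unfold pvRects at ht
  obtain ⟨ins, hins, rfl⟩ := List.mem_map.mp ht
  obtain ⟨hmem, hcond⟩ := List.mem_filter.mp hins
  have hcond' : ins.2.1.1 ≤ ins.2.1.2 ∧ ins.2.2.1 ≤ ins.2.2.2 := by simpa using hcond
  obtain ⟨_, h1, h2, h3, h4⟩ := h ins hmem hcond'.1 hcond'.2
  simp only
  omega

theorem pvStripOK (rects : List (String × Int × Int × Int × Int)) (x : Int)
    (hR : ∀ t ∈ rects, 0 ≤ t.2.1 ∧ t.2.1 < t.2.2.1 ∧ t.2.2.1 ≤ 1000 ∧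
      0 ≤ t.2.2.2.1 ∧ t.2.2.2.1 < t.2.2.2.2 ∧ t.2.2.2.2 ≤ 1000) :
    ∀ s ∈ pvStrip rects x, 0 ≤ s.2.1 ∧ s.2.1 < s.2.2 ∧ s.2.2 ≤ 1000 := by
  intro s hs
  unfold pvStrip at hs
  obtain ⟨t, ht, rfl⟩ := List.mem_map.mp hs
  obtain ⟨hmem, _⟩ := List.mem_filter.mp ht
  obtain ⟨_, _, _, h4, h5, h6⟩ := hR t hmem
  exact ⟨h4, h5, h6⟩

-- a cell not covered on the x-axis by any rectangle has value 0
theorem pvRectCell_zero (rects : List (String × Int × Int × Int × Int)) (x y : Int)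
    (h : ∀ t ∈ rects, ¬ (t.2.1 ≤ x ∧ x < t.2.2.1)) : pvRectCell rects x y = 0 := by
  unfold pvRectCell
  refine Eq.trans (PySem.List.foldl_congr_mem _ _ (fun v _ => v) _ ?_)
    (PySem.List.foldl_ignore _ _)
  intro acc t ht
  rw [if_neg (by have := h t ht; tauto)]

-- between two consecutive x-breakpoints the cell value is constant in x
theorem pvRectCell_const (rects : List (String × Int × Int × Int × Int)) (a x y : Int)
    (h : ∀ t ∈ rects, (t.2.1 ≤ x ∧ x < t.2.2.1) ↔ (t.2.1 ≤ a ∧ a < t.2.2.1)) :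
    pvRectCell rects x y = pvRectCell rects a y := by
  unfold pvRectCell
  apply PySem.List.foldl_congr_mem
  intro acc t ht
  exact if_congr (by have := h t ht; tauto) rfl rfl

-- a strip value at an uncovered y is 0
theorem pvSRV_zero (strip : List (String × Int × Int)) (y : Int)
    (h : ∀ s ∈ strip, ¬ (s.2.1 ≤ y ∧ y < s.2.2)) : pvStripRegionValue strip y = 0 := by
  unfold pvStripRegionValue
  refine Eq.trans (PySem.List.foldl_congr_mem _ _ (fun v _ => v) _ ?_)
    (PySem.List.foldl_ignore _ _)
  intro acc s hs
  rw [if_neg (h s hs)]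

theorem pvSRV_const (strip : List (String × Int × Int)) (c y : Int)
    (h : ∀ s ∈ strip, (s.2.1 ≤ y ∧ y < s.2.2) ↔ (s.2.1 ≤ c ∧ c < s.2.2)) :
    pvStripRegionValue strip y = pvStripRegionValue strip c := by
  unfold pvStripRegionValue
  apply PySem.List.foldl_congr_mem
  intro acc s hs
  exact if_congr (h s hs) rfl rfl

-- the initial grid
set_option maxRecDepth 4096 in
theorem pvGrid0_OK : pvOK (((PySem.List.pyRange 0 1000).map
    (fun _ => ((PySem.List.pyRange 0 1000).map (fun _ => (0 : Int))).toArray)).toArray) := by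
  constructor
  · rw [List.size_toArray, List.length_map, PySem.List.length_pyRange_one]; rfl
  · intro i hi
    rw [List.size_toArray, List.length_map, PySem.List.length_pyRange_one] at hi
    rw [pvGetBang_eq _ i (by rw [List.size_toArray, List.length_map]; exact_mod_cast hi)]
    rw [List.getElem_toArray, List.getElem_map]
    rw [List.size_toArray, List.length_map, PySem.List.length_pyRange_one]; rfl

set_option maxRecDepth 4096 in
theorem pvGrid0_get (r c : Int) (hr0 : 0 ≤ r) (hr1 : r < 1000) (hc0 : 0 ≤ c) (hc1 : c < 1000) :
    pvGridGet (((PySem.List.pyRange 0 1000).map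
      (fun _ => ((PySem.List.pyRange 0 1000).map (fun _ => (0 : Int))).toArray)).toArray) r c = 0 := by
  have h1000 : (((PySem.List.pyRange 0 1000).map
      (fun _ => ((PySem.List.pyRange 0 1000).map (fun _ => (0 : Int))).toArray)).toArray).size = 1000 := by
    rw [List.size_toArray, List.length_map, PySem.List.length_pyRange_one]; rfl
  unfold pvGridGet pvRow pvAt
  rw [pvIdx?_inb _ r hr0 (by rw [h1000]; exact_mod_cast hr1)]
  dsimp only
  rw [pvGetBang_eq _ r.toNat (by omega)]
  rw [List.getElem_toArray, List.getElem_map]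
  have hrowsz : (((PySem.List.pyRange 0 1000).map (fun _ => (0 : Int))).toArray).size = 1000 := by
    rw [List.size_toArray, List.length_map, PySem.List.length_pyRange_one]; rfl
  rw [pvIdx?_inb _ c hc0 (by rw [hrowsz]; exact_mod_cast hc1)]
  dsimp only
  rw [pvGetBang_eq _ c.toNat (by omega)]
  rw [List.getElem_toArray, List.getElem_map]

set_option maxRecDepth 8192 in
theorem pvA_eq_sum (l : List (String × (Int × Int) × (Int × Int)))
    (h : Pre_count_lights_on l) :
    count_lights_on l = ((PySem.List.pyRange 0 1000).map (fun x =>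
      ((PySem.List.pyRange 0 1000).map (fun y => pvRectCell (pvRects l) x y)).sum)).sum := by
  obtain ⟨gOK, gget⟩ := pvInstrFold l _ pvGrid0_OK h
  simp only [count_lights_on]
  set G := l.foldl (fun g ins =>
    (PySem.List.pyRange ins.2.1.1 (ins.2.1.2 + 1)).foldl (fun g r =>
      (PySem.List.pyRange ins.2.2.1 (ins.2.2.2 + 1)).foldl (fun g c =>
        pvGridSet g r c (pvApply ins.1 (pvGridGet g r c))) g) g)
    (((PySem.List.pyRange 0 1000).map (fun _ =>
      ((PySem.List.pyRange 0 1000).map (fun _ => (0 : Int))).toArray)).toArray) with hGdef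
  have hlen : ((G.size : Nat) : Int) = 1000 := by rw [gOK.1]; rfl
  have hrow : (((pvRow G 0).size : Nat) : Int) = 1000 := by
    unfold pvRow
    rw [pvIdx?_inb G.size 0 le_rfl (by rw [gOK.1]; norm_num)]
    dsimp only
    rw [show ((0 : Int).toNat) = 0 from rfl, gOK.2 0 (by rw [gOK.1]; norm_num)]
    rfl
  rw [hlen, hrow]
  refine Eq.trans (PySem.List.foldl_congr_mem _ _
    (fun lights i => lights +
      ((PySem.List.pyRange 0 1000).map (fun j => pvGridGet G i j)).sum) _
    (by intro acc i _; rw [PySem.List.foldl_add])) ?_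
  rw [PySem.List.foldl_add, zero_add]
  refine congrArg List.sum (List.map_congr_left ?_)
  intro x hx
  obtain ⟨hx0, hx1⟩ := PySem.List.mem_pyRange_one.mp hx
  congr 1
  apply List.map_congr_left
  intro y hy
  obtain ⟨hy0, hy1⟩ := PySem.List.mem_pyRange_one.mp hy
  rw [gget x y hx0 hx1 hy0 hy1, pvGrid0_get x y hx0 hx1 hy0 hy1]
  refine Eq.trans (PySem.List.foldl_congr_mem _ _
    (fun v ins => if ins.2.1.1 ≤ x ∧ x ≤ ins.2.1.2 ∧ ins.2.2.1 ≤ y ∧ y ≤ ins.2.2.2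
      then pvOp ins.1 v else v) _
    (by intro acc ins _; exact if_congr Iff.rfl (pvApply_eq_pvOp _ _) rfl))
    (pvCell_eq_rects l x y)

-- ===== VERDICT (by name: the statement is the Claim_ definition above) =====
set_option maxRecDepth 8192 in
theorem count_lights_on_spec : Claim_equal_count_lights_on := by
  intro l _ hpre
  unfold Spec_count_lights_on
  have hR := pvRectsOK l hpre
  set rects := pvRects l with hrects
  set xs := pvXs rects with hxs
  have hxsort := pvXs_sorted rects
  -- B as a nested pair sum
  have hB : count_lights_on_alt l =
      ((pvPairs xs).map (fun p =>
        ((pvPairs (pvYs (pvStrip rects p.1))).map (fun q =>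
          pvStripRegionValue (pvStrip rects p.1) q.1 * (p.2 - p.1) * (q.2 - q.1))).sum)).sum := by
    simp only [count_lights_on_alt]
    refine Eq.trans (PySem.List.foldl_congr_mem _ _
      (fun total i => total +
        ((pvPairs (pvYs (pvStrip rects (PySem.List.pyGetD xs i 0)))).map (fun q =>
          pvStripRegionValue (pvStrip rects (PySem.List.pyGetD xs i 0)) q.1 *
            (PySem.List.pyGetD xs (i + 1) 0 - PySem.List.pyGetD xs i 0) * (q.2 - q.1))).sum) _
      (by
        intro acc i _
        exact pvFoldPairs (pvYs (pvStrip rects (PySem.List.pyGetD xs i 0)))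
          (fun c d => pvStripRegionValue (pvStrip rects (PySem.List.pyGetD xs i 0)) c *
            (PySem.List.pyGetD xs (i + 1) 0 - PySem.List.pyGetD xs i 0) * (d - c)) acc)) ?_
    rw [pvFoldPairs xs (fun a b =>
      ((pvPairs (pvYs (pvStrip rects a))).map (fun q =>
        pvStripRegionValue (pvStrip rects a) q.1 * (b - a) * (q.2 - q.1))).sum) 0]
    rw [zero_add]
  rw [pvA_eq_sum l hpre, hB]
  -- tile the x-axis
  rw [pvTile xs 0 1000 (fun x => ((PySem.List.pyRange 0 1000).map
      (fun y => pvRectCell rects x y)).sum) hxsort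
    (by
      intro q hq
      obtain ⟨t, ht, hq⟩ := (pvXs_mem rects q).mp hq
      have := hR t ht
      omega)
    (by
      intro x _ _ hd
      apply List.sum_eq_zero
      intro v hv
      obtain ⟨y, _, rfl⟩ := List.mem_map.mp hv
      apply pvRectCell_zero
      intro t ht
      rcases hd with hd | hd
      · have := hd t.2.1 ((pvXs_mem rects t.2.1).mpr ⟨t, ht, Or.inl rfl⟩)
        omega
      · have := hd t.2.2.1 ((pvXs_mem rects t.2.2.1).mpr ⟨t, ht, Or.inr rfl⟩)
        omega)
    (by
      intro p hp x hpx1 hpx2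
      obtain ⟨hm1, hm2, hlt, hsep⟩ := pvPairs_facts xs hxsort p hp
      dsimp only
      refine congrArg List.sum (List.map_congr_left ?_)
      intro y _
      apply pvRectCell_const
      intro t ht
      have h1 := hsep t.2.1 ((pvXs_mem rects t.2.1).mpr ⟨t, ht, Or.inl rfl⟩)
      have h2 := hsep t.2.2.1 ((pvXs_mem rects t.2.2.1).mpr ⟨t, ht, Or.inr rfl⟩)
      constructor <;> intro hc <;> omega)
    (by omega)]
  -- per x-strip, tile the y-axis
  refine congrArg List.sum (List.map_congr_left ?_)
  intro p hp
  set strip := pvStrip rects p.1 with hstrip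
  have hS := pvStripOK rects p.1 hR
  have hysort := pvYs_sorted strip
  have hinner : ((PySem.List.pyRange 0 1000).map (fun y => pvRectCell rects p.1 y)).sum =
      ((pvPairs (pvYs strip)).map (fun q => (q.2 - q.1) * pvStripRegionValue strip q.1)).sum := by
    rw [List.map_congr_left (fun y _ => (pvStrip_cell rects p.1 y).symm)]
    exact pvTile (pvYs strip) 0 1000 (fun y => pvStripRegionValue strip y) hysort
      (by
        intro q hq
        obtain ⟨s, hs, hq⟩ := (pvYs_mem strip q).mp hq
        have := hS s hs
        omega)
      (by
        intro y _ _ hd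
        apply pvSRV_zero
        intro s hs
        rcases hd with hd | hd
        · have := hd s.2.1 ((pvYs_mem strip s.2.1).mpr ⟨s, hs, Or.inl rfl⟩)
          omega
        · have := hd s.2.2 ((pvYs_mem strip s.2.2).mpr ⟨s, hs, Or.inr rfl⟩)
          omega)
      (by
        intro q hq y hqy1 hqy2
        obtain ⟨hm1, hm2, hlt, hsep⟩ := pvPairs_facts (pvYs strip) hysort q hq
        apply pvSRV_const
        intro s hs
        have h1 := hsep s.2.1 ((pvYs_mem strip s.2.1).mpr ⟨s, hs, Or.inl rfl⟩)
        have h2 := hsep s.2.2 ((pvYs_mem strip s.2.2).mpr ⟨s, hs, Or.inr rfl⟩)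
        constructor <;> intro hc <;> omega)
      (by omega)
  rw [hinner, ← List.sum_map_mul_left]
  refine congrArg List.sum (List.map_congr_left ?_)
  intro q _
  ring
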